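-- pv_equiv track=rewrite | github.com/BKreisel/Advent-of-Code-2018 | python/day02_challenge1.py | validate_boxid
-- ===== SOURCE A (Python) =====
-- from typing import Dict, Tuple
--
-- def validate_boxid(box_id: str) -> Tuple[bool, bool]:
--     letter_counts = count_letters(box_id)
--     valid_two: bool = False
--     valid_three: bool = False
--
--     for letter, count in letter_counts.items():
--         if count == 2:
--             valid_two = True
--         elif count == 3:
--             valid_three = True
--     return (valid_two, valid_three)
--
-- def count_letters(box_id: str) -> Dict[str, int]:
--     letter_counts: Dict[str, int] = {}
--     for letter in box_id:
--         if letter in letter_counts.keys():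
--             letter_counts[letter] += 1
--         else:
--             letter_counts[letter] = 1
--     return letter_counts
-- ===== SOURCE B (Python) =====
-- def validate_boxid(box_id):
--     # sort the characters; equal letters become adjacent, then one run-length scan
--     chars = sorted(box_id)
--     valid_two = False
--     valid_three = False
--     if not chars:
--         return (valid_two, valid_three)
--     cur = chars[0]
--     run = 1
--     for c in chars[1:]:
--         if c == cur:
--             run += 1
--         else:
--             if run == 2:
--                 valid_two = True
--             elif run == 3:
--                 valid_three = True
--             cur = c
--             run = 1
--     if run == 2:
--         valid_two = True
--     elif run == 3:
--         valid_three = True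
--     return (valid_two, valid_three)
-- ===== Notes on version B (the rewrite author's own statement) =====
-- stated objective: alternative
-- what changed: Replaces the frequency-dict build plus dict-items scan with sorting the characters and a single run-length scan over the sorted sequence (no dict at all).
import Mathlib
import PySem

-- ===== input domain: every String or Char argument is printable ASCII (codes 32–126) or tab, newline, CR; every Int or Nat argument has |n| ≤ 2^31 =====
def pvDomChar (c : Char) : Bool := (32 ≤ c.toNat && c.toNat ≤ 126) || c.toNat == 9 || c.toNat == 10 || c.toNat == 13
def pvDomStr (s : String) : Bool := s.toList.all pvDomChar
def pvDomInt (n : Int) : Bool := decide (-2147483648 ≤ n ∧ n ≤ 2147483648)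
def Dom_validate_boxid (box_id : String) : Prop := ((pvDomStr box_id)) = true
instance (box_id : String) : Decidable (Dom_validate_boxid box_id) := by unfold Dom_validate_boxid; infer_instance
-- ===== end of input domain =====

-- B replaces A's frequency-dict build and dict-items scan by sorting the characters and doing one
-- run-length scan over the sorted sequence (alternative decomposition, identical results).


-- ===== PORT A =====
-- count_letters: dict built with an explicit membership test, exactly as in A
def pvCountLetters (box_id : String) : PySem.Dict Char Int :=
  box_id.toList.foldl
    (fun d letter =>
      if d.contains letter then d.insert letter (d.getD letter 0 + 1)
      else d.insert letter 1)
    PySem.Dict.empty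

def validate_boxid (box_id : String) : Bool × Bool :=
  let letter_counts := pvCountLetters box_id
  letter_counts.items.foldl
    (fun (acc : Bool × Bool) p =>
      if p.2 = 2 then (true, acc.2)
      else if p.2 = 3 then (acc.1, true)
      else acc)
    (false, false)

-- ===== PORT B =====
-- the run-length scan over the tail of the sorted list: cur = current character, run = its run length
def pvScan : List Char → Char → Int → Bool → Bool → Bool × Bool
  | [], _, run, t2, t3 =>
      if run = 2 then (true, t3) else if run = 3 then (t2, true) else (t2, t3)
  | c :: rest, cur, run, t2, t3 =>
      if c = cur then pvScan rest cur (run + 1) t2 t3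
      else if run = 2 then pvScan rest c 1 true t3
      else if run = 3 then pvScan rest c 1 t2 true
      else pvScan rest c 1 t2 t3

def validate_boxid_alt (box_id : String) : Bool × Bool :=
  match PySem.List.sorted box_id.toList (fun x => x) false with
  | [] => (false, false)
  | c :: rest => pvScan rest c 1 false false

-- ===== PRECONDITION & SPEC =====
def Spec_validate_boxid (box_id : String) (out : Bool × Bool) : Prop := out = validate_boxid_alt box_id
instance (box_id : String) (out : Bool × Bool) : Decidable (Spec_validate_boxid box_id out) := by unfold Spec_validate_boxid; infer_instance

-- ===== CLAIM (what is proved, stated in full; the proofs are below) =====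
def Claim_equal_validate_boxid : Prop := ∀ (box_id : String), Dom_validate_boxid box_id → Spec_validate_boxid box_id (validate_boxid box_id)

-- ===== LEMMAS AND PROOFS =====

-- A's counting loop is the standard counter (the membership test only guards getD's default)
lemma pvCountLetters_eq_counter (box_id : String) :
    pvCountLetters box_id = PySem.Dict.counter box_id.toList := by
  unfold pvCountLetters
  have h : (fun (d : PySem.Dict Char Int) letter =>
        if d.contains letter then d.insert letter (d.getD letter 0 + 1)
        else d.insert letter 1)
      = (fun d x => d.insert x (d.getD x 0 + 1)) := by
    funext d x
    by_cases h : d.contains x = true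
    · simp [h]
    · simp only [Bool.not_eq_true] at h
      rw [if_neg (by simp [h]), PySem.Dict.getD_of_not_contains d 0 h]
      norm_num
  rw [h, PySem.Dict.foldl_insert_getD_add_one_eq_counter]

-- A's items fold accumulates "some value is 2 / some value is 3"
lemma foldA_eq (ps : List (Char × Int)) (t2 t3 : Bool) :
    ps.foldl
      (fun (acc : Bool × Bool) p =>
        if p.2 = 2 then (true, acc.2)
        else if p.2 = 3 then (acc.1, true)
        else acc) (t2, t3)
    = (t2 || decide (∃ p ∈ ps, p.2 = 2), t3 || decide (∃ p ∈ ps, p.2 = 3)) := by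
  induction ps generalizing t2 t3 with
  | nil => simp
  | cons p ps ih =>
    simp only [List.foldl_cons]
    split_ifs with h1 h2
    · rw [ih]; simp [h1]
    · rw [ih]; simp [h2]
    · rw [ih]; simp [h1, h2]

-- B's scan on a sorted suffix: the flags become "some complete run has length 2 / 3"
lemma pvScan_eq (l : List Char) (cur : Char) (n : Int) (t2 t3 : Bool)
    (hs : l.Pairwise (· ≤ ·)) (hcur : ∀ x ∈ l, cur ≤ x) :
    pvScan l cur n t2 t3 =
      (t2 || decide (n + (l.count cur : Int) = 2 ∨ ∃ c ∈ l, c ≠ cur ∧ (l.count c : Int) = 2),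
       t3 || decide (n + (l.count cur : Int) = 3 ∨ ∃ c ∈ l, c ≠ cur ∧ (l.count c : Int) = 3)) := by
  induction l generalizing cur n t2 t3 with
  | nil =>
    simp only [pvScan, List.count_nil]
    split_ifs with h1 h2 <;> simp_all
  | cons c rest ih =>
    rw [List.pairwise_cons] at hs
    by_cases hc : c = cur
    · subst hc
      rw [pvScan, if_pos rfl, ih c (n + 1) t2 t3 hs.2 hs.1]
      have e : ∀ m : Int, ((n + 1) + (rest.count c : Int) = m ∨ ∃ x ∈ rest, x ≠ c ∧ (rest.count x : Int) = m)
          ↔ (n + ((c :: rest).count c : Int) = m ∨ ∃ x ∈ c :: rest, x ≠ c ∧ ((c :: rest).count x : Int) = m) := by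
        intro m
        constructor
        · rintro (h | ⟨x, hx, hne, hcnt⟩)
          · left; rw [List.count_cons_self]; push_cast; omega
          · right; exact ⟨x, List.mem_cons_of_mem _ hx, hne, by rw [List.count_cons_of_ne (Ne.symm hne)]; exact hcnt⟩
        · rintro (h | ⟨x, hx, hne, hcnt⟩)
          · left; rw [List.count_cons_self] at h; push_cast at h ⊢; omega
          · rcases List.mem_cons.mp hx with rfl | hx
            · exact absurd rfl hne
            · right; exact ⟨x, hx, hne, by rw [List.count_cons_of_ne (Ne.symm hne)] at hcnt; exact hcnt⟩
      simp only [e]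
    · have hlt : cur < c := lt_of_le_of_ne (hcur c (List.mem_cons_self)) (fun h => hc h.symm)
      have hcount0 : (c :: rest).count cur = 0 := by
        rw [List.count_eq_zero]
        intro hmem
        rcases List.mem_cons.mp hmem with h | h
        · exact hc h.symm
        · exact absurd (lt_of_lt_of_le hlt (hs.1 cur h)) (lt_irrefl cur)
      have q : ∀ m : Int, (∃ x ∈ c :: rest, x ≠ cur ∧ ((c :: rest).count x : Int) = m)
          ↔ (1 + (rest.count c : Int) = m ∨ ∃ x ∈ rest, x ≠ c ∧ (rest.count x : Int) = m) := by
        intro m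
        constructor
        · rintro ⟨x, hx, hne, hcnt⟩
          rcases List.mem_cons.mp hx with rfl | hx
          · left; rw [List.count_cons_self] at hcnt; push_cast at hcnt ⊢; omega
          · by_cases hxc : x = c
            · subst hxc; left; rw [List.count_cons_self] at hcnt; push_cast at hcnt ⊢; omega
            · right; exact ⟨x, hx, hxc, by rw [List.count_cons_of_ne (Ne.symm hxc)] at hcnt; exact hcnt⟩
        · rintro (h | ⟨x, hx, hne, hcnt⟩)
          · exact ⟨c, List.mem_cons_self, fun h' => hc h', by rw [List.count_cons_self]; push_cast; omega⟩
          · refine ⟨x, List.mem_cons_of_mem _ hx, ?_, by rw [List.count_cons_of_ne (Ne.symm hne)]; exact hcnt⟩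
            intro hx'
            subst hx'
            exact absurd (lt_of_lt_of_le hlt (hs.1 x hx)) (lt_irrefl x)
      rw [pvScan, if_neg hc]
      split_ifs with h2 h3
      · rw [ih c 1 true t3 hs.2 hs.1]
        simp only [q, hcount0, Nat.cast_zero, add_zero]
        subst h2
        simp
      · rw [ih c 1 t2 true hs.2 hs.1]
        simp only [q, hcount0, Nat.cast_zero, add_zero]
        subst h3
        simp
      · rw [ih c 1 t2 t3 hs.2 hs.1]
        simp only [q, hcount0, Nat.cast_zero, add_zero]
        simp [h2, h3]

-- folding in the head of a list: "some element occurs m times" split into the head's run and the rest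
lemma run_head_iff (c : Char) (rest : List Char) (m : Int) :
    (∃ k ∈ c :: rest, ((c :: rest).count k : Int) = m)
      ↔ (1 + (rest.count c : Int) = m ∨ ∃ x ∈ rest, x ≠ c ∧ (rest.count x : Int) = m) := by
  constructor
  · rintro ⟨k, hk, hcnt⟩
    rcases List.mem_cons.mp hk with rfl | hk
    · left; rw [List.count_cons_self] at hcnt; push_cast at hcnt ⊢; omega
    · by_cases hkc : k = c
      · subst hkc; left; rw [List.count_cons_self] at hcnt; push_cast at hcnt ⊢; omega
      · right; exact ⟨k, hk, hkc, by rw [List.count_cons_of_ne (Ne.symm hkc)] at hcnt; exact hcnt⟩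
  · rintro (h | ⟨x, hx, hne, hcnt⟩)
    · exact ⟨c, List.mem_cons_self, by rw [List.count_cons_self]; push_cast; omega⟩
    · exact ⟨x, List.mem_cons_of_mem _ hx, by rw [List.count_cons_of_ne (Ne.symm hne)]; exact hcnt⟩

-- ===== VERDICT (by name: the statement is the Claim_ definition above) =====
theorem validate_boxid_spec : Claim_equal_validate_boxid := by
  intro box_id _
  unfold Spec_validate_boxid validate_boxid validate_boxid_alt
  dsimp only
  rw [pvCountLetters_eq_counter, PySem.Dict.items_counter, foldA_eq]
  have hA : ∀ m : Int,
      (∃ p ∈ (PySem.Set.ofList box_id.toList).map (fun k => (k, (box_id.toList.count k : Int))), p.2 = m)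
        ↔ (∃ k ∈ box_id.toList, (box_id.toList.count k : Int) = m) := by
    intro m
    constructor
    · rintro ⟨p, hp, hv⟩
      rcases List.mem_map.mp hp with ⟨k, hk, rfl⟩
      exact ⟨k, (PySem.Set.mem_ofList _ _).mp hk, hv⟩
    · rintro ⟨k, hk, hv⟩
      exact ⟨(k, (box_id.toList.count k : Int)), List.mem_map.mpr ⟨k, (PySem.Set.mem_ofList _ _).mpr hk, rfl⟩, hv⟩
  simp only [hA, Bool.false_or]
  rcases h : PySem.List.sorted box_id.toList (fun x => x) false with _ | ⟨c, rest⟩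
  · have : box_id.toList = [] := (PySem.List.sorted_eq_nil_iff _ _ _).mp h
    simp [this]
  · have hperm : (c :: rest).Perm box_id.toList := h ▸ PySem.List.sorted_perm box_id.toList (fun x => x) false
    have hpw : (c :: rest).Pairwise (· ≤ ·) := by
      have := PySem.List.sorted_pairwise box_id.toList (fun x => x)
      rw [h] at this
      exact this
    rw [List.pairwise_cons] at hpw
    show _ = pvScan rest c 1 false false
    rw [pvScan_eq rest c 1 false false hpw.2 hpw.1]
    have hcl : ∀ m : Int, (∃ k ∈ box_id.toList, (box_id.toList.count k : Int) = m)
        ↔ (1 + (rest.count c : Int) = m ∨ ∃ x ∈ rest, x ≠ c ∧ (rest.count x : Int) = m) := by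
      intro m
      rw [← run_head_iff]
      constructor
      · rintro ⟨k, hk, hv⟩
        exact ⟨k, hperm.mem_iff.mpr hk, by rw [hperm.count_eq]; exact hv⟩
      · rintro ⟨k, hk, hv⟩
        exact ⟨k, hperm.mem_iff.mp hk, by rw [← hperm.count_eq]; exact hv⟩
    simp only [hcl, Bool.false_or]
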